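-- pv_equiv track=rewrite | github.com/BWSI-RACECAR/code-clash-09-NotBeni | licenseplate.py | licensePlate
-- ===== SOURCE A (Python) =====
-- def licensePlate(str):
--     # type str: string
--     # return: int
--
--     # TODO: Write code below to return an int with the solution to the prompt
--     letters = str[:3]
--     numbers = str[3:7]
--     counter = 0
--     poss = 1
--
--     for i in letters:
--         if i == ".":
--             counter += 1
--
--     if counter == 1:
--         poss *= 24
--     elif counter == 2:
--         poss *= 25*24
--     elif counter == 3:
--         poss *= 26*25*24
--
--     counter = 0
--
--     for n in numbers:
--         if n == ".":
--             counter += 1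
--
--     if counter == 1:
--         poss *= 7
--     elif counter == 2:
--         poss *= 8*7
--     elif counter == 3:
--         poss *= 9*8*7
--     elif counter == 4:
--         poss *= 10*9*8*7
--
--     return poss
-- ===== SOURCE B (Python) =====
-- def licensePlate(str):
--     poss = 1
--     lc = 0
--     nc = 0
--     for pos, ch in enumerate(str[:7]):
--         if ch == ".":
--             if pos < 3:
--                 poss *= 24 + lc
--                 lc += 1
--             else:
--                 poss *= 7 + nc
--                 nc += 1
--     return poss
-- ===== Notes on version B (the rewrite author's own statement) =====
-- stated objective: alternative
-- what changed: Replaces A's staged count-then-branch-table design (two counting loops plus two if/elif constant ladders) by a single enumerate pass over the first 7 characters that multiplies the next falling-factorial factor (24+lc or 7+nc, chosen by position) into the accumulator the moment each dot is seen, so no dot counts or constant tables exist.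
import Mathlib
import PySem

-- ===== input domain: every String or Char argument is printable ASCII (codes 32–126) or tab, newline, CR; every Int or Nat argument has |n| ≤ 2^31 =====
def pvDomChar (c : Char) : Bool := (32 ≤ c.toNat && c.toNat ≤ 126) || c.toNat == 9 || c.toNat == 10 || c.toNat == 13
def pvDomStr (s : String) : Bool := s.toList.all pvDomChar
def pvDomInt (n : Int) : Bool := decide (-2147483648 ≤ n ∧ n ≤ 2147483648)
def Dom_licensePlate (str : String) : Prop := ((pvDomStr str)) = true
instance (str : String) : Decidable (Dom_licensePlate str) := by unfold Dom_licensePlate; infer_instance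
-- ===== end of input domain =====

-- B replaces A's count-then-branch-table design by a single enumerate pass over the first
-- 7 characters that multiplies the next falling-factorial factor at each dot (alternative decomposition, same cost).


-- ===== PORT A =====
def licensePlate (str : String) : Int :=
  let letters : List Char := PySem.List.slice str.toList none (some 3)
  let numbers : List Char := PySem.List.slice str.toList (some 3) (some 7)
  let counter : Int := 0
  let poss : Int := 1
  let counter := letters.foldl (fun acc i => if i == '.' then acc + 1 else acc) counter
  let poss :=
    if counter == 1 then poss * 24
    else if counter == 2 then poss * (25 * 24)
    else if counter == 3 then poss * (26 * 25 * 24)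
    else poss
  let counter : Int := 0
  let counter := numbers.foldl (fun acc n => if n == '.' then acc + 1 else acc) counter
  let poss :=
    if counter == 1 then poss * 7
    else if counter == 2 then poss * (8 * 7)
    else if counter == 3 then poss * (9 * 8 * 7)
    else if counter == 4 then poss * (10 * 9 * 8 * 7)
    else poss
  poss

-- ===== PORT B =====
-- single pass over enumerate(str[:7]); state (poss, lc, nc)
def licensePlate_alt (str : String) : Int :=
  let st := (PySem.List.enumerate (PySem.List.slice str.toList none (some 7)) 0).foldl
    (fun (st : Int × Int × Int) (pc : Int × Char) =>
      if pc.2 == '.' then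
        if pc.1 < 3 then (st.1 * (24 + st.2.1), st.2.1 + 1, st.2.2)
        else (st.1 * (7 + st.2.2), st.2.1, st.2.2 + 1)
      else st) (1, 0, 0)
  st.1

-- ===== PRECONDITION & SPEC =====
def Spec_licensePlate (str : String) (out : Int) : Prop := out = licensePlate_alt str
instance (str : String) (out : Int) : Decidable (Spec_licensePlate str out) := by unfold Spec_licensePlate; infer_instance

-- ===== CLAIM =====
def Claim_equal_licensePlate : Prop := ∀ (str : String), Dom_licensePlate str → Spec_licensePlate str (licensePlate str)

-- ===== LEMMAS AND PROOFS =====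

-- falling-factorial product: ff b c = b * (b+1) * … * (b+c-1)
def ff (b : Int) : Nat → Int
  | 0 => 1
  | c+1 => b * ff (b+1) c

-- the step function of B's fold, named for the lemmas
def bstep (st : Int × Int × Int) (pc : Int × Char) : Int × Int × Int :=
  if pc.2 == '.' then
    if pc.1 < 3 then (st.1 * (24 + st.2.1), st.2.1 + 1, st.2.2)
    else (st.1 * (7 + st.2.2), st.2.1, st.2.2 + 1)
  else st

theorem letters_fold (ys : List Char) : ∀ (s : Int), 0 ≤ s → s + ys.length ≤ 3 →
    ∀ (p lc nc : Int),
    (PySem.List.enumerate ys s).foldl bstep (p, lc, nc)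
      = (p * ff (24 + lc) (ys.count '.'), lc + ys.count '.', nc) := by
  induction ys with
  | nil => intro s _ _ p lc nc; simp [PySem.List.enumerate_nil, ff]
  | cons y ys ih =>
    intro s hs hlen p lc nc
    push_cast [List.length_cons] at hlen
    simp only [PySem.List.enumerate_cons, List.foldl_cons]
    by_cases hy : y = '.'
    · have hb : bstep (p, lc, nc) (s, y) = (p * (24 + lc), lc + 1, nc) := by
        simp [bstep, hy]; omega
      rw [hb, ih (s+1) (by omega) (by omega), hy, List.count_cons_self]
      show _ = (p * ff (24 + lc) (ys.count '.' + 1), _, _)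
      refine Prod.ext ?_ (Prod.ext ?_ rfl)
      · show p * (24 + lc) * ff (24 + (lc + 1)) (ys.count '.') = p * ff (24 + lc) (ys.count '.' + 1)
        rw [ff]; ring_nf
      · push_cast; omega
    · have hb : bstep (p, lc, nc) (s, y) = (p, lc, nc) := by
        simp [bstep, hy]
      rw [hb, ih (s+1) (by omega) (by omega),
        List.count_cons_of_ne hy]

theorem numbers_fold (zs : List Char) : ∀ (s : Int), (zs = [] ∨ 3 ≤ s) →
    ∀ (p lc nc : Int),
    (PySem.List.enumerate zs s).foldl bstep (p, lc, nc)
      = (p * ff (7 + nc) (zs.count '.'), lc, nc + zs.count '.') := by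
  induction zs with
  | nil => intro s _ p lc nc; simp [PySem.List.enumerate_nil, ff]
  | cons z zs ih =>
    intro s hs p lc nc
    have h3 : 3 ≤ s := by
      rcases hs with h | h
      · exact absurd h (List.cons_ne_nil z zs)
      · exact h
    simp only [PySem.List.enumerate_cons, List.foldl_cons]
    by_cases hz : z = '.'
    · have hb : bstep (p, lc, nc) (s, z) = (p * (7 + nc), lc, nc + 1) := by
        simp [bstep, hz]; omega
      rw [hb, ih (s+1) (Or.inr (by omega)), hz, List.count_cons_self]
      show _ = (p * ff (7 + nc) (zs.count '.' + 1), _, _)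
      refine Prod.ext ?_ (Prod.ext rfl ?_)
      · show p * (7 + nc) * ff (7 + (nc + 1)) (zs.count '.') = p * ff (7 + nc) (zs.count '.' + 1)
        rw [ff]; ring_nf
      · push_cast; omega
    · have hb : bstep (p, lc, nc) (s, z) = (p, lc, nc) := by
        simp [bstep, hz]
      rw [hb, ih (s+1) (Or.inr (by omega)),
        List.count_cons_of_ne hz]

theorem count_take_le (xs : List Char) (n : Nat) (v : Char) : (xs.take n).count v ≤ n := by
  calc (xs.take n).count v ≤ (xs.take n).length := List.count_le_length
    _ ≤ n := List.length_take_le n xs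

-- final arithmetic: the two ladders equal the two falling-factorial products, for the counts the windows allow
theorem ladders_eq_ff (c1 c2 : Nat) (h1 : c1 ≤ 3) (h2 : c2 ≤ 4) :
    (let poss : Int := 1
     let poss :=
       if (c1 : Int) == 1 then poss * 24
       else if (c1 : Int) == 2 then poss * (25 * 24)
       else if (c1 : Int) == 3 then poss * (26 * 25 * 24)
       else poss
     if (c2 : Int) == 1 then poss * 7
     else if (c2 : Int) == 2 then poss * (8 * 7)
     else if (c2 : Int) == 3 then poss * (9 * 8 * 7)
     else if (c2 : Int) == 4 then poss * (10 * 9 * 8 * 7)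
     else poss)
    = (1 * ff (24 + 0) c1) * ff (7 + 0) c2 := by
  interval_cases c1 <;> interval_cases c2 <;> decide

-- ===== VERDICT =====
theorem licensePlate_spec : Claim_equal_licensePlate := by
  intro str _
  unfold Spec_licensePlate
  have e1 : PySem.List.slice str.toList none (some 3) = str.toList.take 3 := by
    rw [PySem.List.slice_to str.toList (by norm_num)]; rfl
  have e2 : PySem.List.slice str.toList (some 3) (some 7) = (str.toList.drop 3).take 4 := by
    rw [PySem.List.slice_toNat str.toList (by norm_num) (by norm_num)]; rfl
  have e7 : PySem.List.slice str.toList none (some 7) = str.toList.take 7 := by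
    rw [PySem.List.slice_to str.toList (by norm_num)]; rfl
  have hsplit : str.toList.take 7 = str.toList.take 3 ++ (str.toList.drop 3).take 4 := by
    conv_lhs => rw [← List.take_append_drop 3 (str.toList.take 7)]
    rw [List.take_take, List.drop_take]
    norm_num
  have hstep : (fun (st : Int × Int × Int) (pc : Int × Char) =>
      if pc.2 == '.' then
        if pc.1 < 3 then (st.1 * (24 + st.2.1), st.2.1 + 1, st.2.2)
        else (st.1 * (7 + st.2.2), st.2.1, st.2.2 + 1)
      else st) = bstep := rfl
  have hnum : ((str.toList.drop 3).take 4 = [] ∨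
      (3 : Int) ≤ ((str.toList.take 3).length : Int)) := by
    by_cases h : str.toList.length ≤ 3
    · left
      have : str.toList.drop 3 = [] := List.drop_eq_nil_of_le h
      simp [this]
    · right
      have h3 : (str.toList.take 3).length = 3 := by
        rw [List.length_take]; omega
      rw [h3]; norm_num
  simp only [licensePlate, licensePlate_alt, e1, e2, e7, hstep,
    PySem.List.foldl_beq_add_one, zero_add, hsplit,
    PySem.List.enumerate_append, List.foldl_append]
  rw [letters_fold (str.toList.take 3) 0 (by norm_num)
        (by simp),
      numbers_fold ((str.toList.drop 3).take 4) _ hnum]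
  rw [ladders_eq_ff _ _ (count_take_le _ 3 '.') (count_take_le _ 4 '.')]
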